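-- pv_equiv track=rewrite | github.com/jshilkova/advent_of_code | 14/14.2.py | count_round_stones_vert
-- ===== SOURCE A (Python) =====
-- def count_round_stones_vert(field, m, n):
--     round_stones_count = [[] for _j in range(m)]
--     for j in range(0, m):
--         r = 0
--         for i in range(0, n):
--             if field[i][j] == 'O':
--                 r += 1
--             if field[i][j] == '#':
--                 round_stones_count[j].append(r)
--                 r = 0
--         round_stones_count[j].append(r)
--     return round_stones_count
-- ===== SOURCE B (Python) =====
-- def count_round_stones_vert(field, m, n):
--     def segments(col):
--         # counts of 'O' in the stretches of col between '#' walls (always >= 1 segment)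
--         counts = []
--         while '#' in col:
--             k = col.index('#')
--             counts.append(col[:k].count('O'))
--             col = col[k + 1:]
--         counts.append(col.count('O'))
--         return counts
--     return [segments([field[i][j] for i in range(n)]) for j in range(m)]
-- ===== Notes on version B (the rewrite author's own statement) =====
-- stated objective: alternative
-- what changed: The running counter with a '#'-branch per cell is replaced by a split-then-count pipeline: each column is materialised as a list, repeatedly split at the first '#' wall, and 'O' is counted per segment with list.count.
import Mathlib
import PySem

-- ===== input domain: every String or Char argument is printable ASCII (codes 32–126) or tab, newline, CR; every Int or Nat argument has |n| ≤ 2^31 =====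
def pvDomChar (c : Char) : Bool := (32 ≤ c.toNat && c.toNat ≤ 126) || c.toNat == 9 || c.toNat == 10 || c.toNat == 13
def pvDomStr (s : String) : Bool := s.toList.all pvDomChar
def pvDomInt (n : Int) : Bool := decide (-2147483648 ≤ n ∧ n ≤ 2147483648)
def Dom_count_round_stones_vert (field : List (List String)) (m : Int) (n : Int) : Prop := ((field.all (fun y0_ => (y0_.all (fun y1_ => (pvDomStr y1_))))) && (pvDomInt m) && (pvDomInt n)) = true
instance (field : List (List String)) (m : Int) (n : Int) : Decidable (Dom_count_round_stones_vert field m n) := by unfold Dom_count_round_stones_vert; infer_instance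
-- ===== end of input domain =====

-- B replaces A's per-cell running counter and '#'-branch by repeatedly splitting each
-- column at the first '#' and counting 'O' per segment (alternative decomposition, same cost).

-- field[i][j]; Pre_ guarantees both indices are in range, so the default is never used
def pvCell (field : List (List String)) (i j : Int) : String :=
  PySem.List.pyGetD (PySem.List.pyGetD field i []) j ""

-- ===== PORT A =====
-- one step of A's inner loop body: `if cell=='O': r+=1`, then `if cell=='#': append r; r=0`
def pvStepA (st : List Int × Int) (c : String) : List Int × Int :=
  let r := if c = "O" then st.2 + 1 else st.2
  if c = "#" then (st.1 ++ [r], 0) else (st.1, r)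

def count_round_stones_vert (field : List (List String)) (m : Int) (n : Int) : List (List Int) :=
  -- round_stones_count = [[] for _j in range(m)]
  let init : List (List Int) := (PySem.List.pyRange 0 m 1).map (fun _ => [])
  -- for j in range(0, m): inner loop over i, then round_stones_count[j].append(r)
  (PySem.List.pyRange 0 m 1).foldl
    (fun rsc j =>
      let st := (PySem.List.pyRange 0 n 1).foldl
        (fun st i => pvStepA st (pvCell field i j)) ([], 0)
      rsc.set j.toNat (st.1 ++ [st.2]))
    init

-- ===== PORT B =====
-- Source B's `segments`: while '#' in col: split at first '#' (list.index = idxOf, col[:k] = take k,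
-- col[k+1:] = drop (k+1), list.count = List.count — exact, indices nonnegative), then trailing segment
def pvSegments (counts : List Int) (col : List String) : List Int :=
  if h : "#" ∈ col then
    let k := col.idxOf "#"
    pvSegments (counts ++ [((col.take k).count "O" : Int)]) (col.drop (k + 1))
  else
    counts ++ [((col.count "O" : Int))]
termination_by col.length
decreasing_by
  simp only [List.length_drop]
  have : 0 < col.length := List.length_pos_of_mem h
  omega

def count_round_stones_vert_alt (field : List (List String)) (m : Int) (n : Int) : List (List Int) :=
  (PySem.List.pyRange 0 m 1).map (fun j =>
    pvSegments [] ((PySem.List.pyRange 0 n 1).map (fun i => pvCell field i j)))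

-- ===== PRECONDITION & SPEC =====
-- Pre_: exactly the inputs where A's accesses field[i][j] (i<n, j<m) never raise IndexError
def Pre_count_round_stones_vert (field : List (List String)) (m : Int) (n : Int) : Prop :=
  0 < m → 0 < n →
    (n ≤ (field.length : Int) ∧ ∀ row ∈ field.take n.toNat, m ≤ (row.length : Int))
instance (field : List (List String)) (m : Int) (n : Int) : Decidable (Pre_count_round_stones_vert field m n) := by unfold Pre_count_round_stones_vert; infer_instance

def pvWitness_count_round_stones_vert : List (List String) × Int × Int :=
  ([["O", "."], ["#", "O"]], 2, 2)

def Spec_count_round_stones_vert (field : List (List String)) (m : Int) (n : Int) (out : List (List Int)) : Prop := out = count_round_stones_vert_alt field m n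
instance (field : List (List String)) (m : Int) (n : Int) (out : List (List Int)) : Decidable (Spec_count_round_stones_vert field m n out) := by unfold Spec_count_round_stones_vert; infer_instance

-- ===== CLAIM (what is proved, stated in full; the proofs are below) =====
def Claim_equal_count_round_stones_vert : Prop := ∀ (field : List (List String)) (m : Int) (n : Int), Dom_count_round_stones_vert field m n → Pre_count_round_stones_vert field m n → Spec_count_round_stones_vert field m n (count_round_stones_vert field m n)

-- ===== LEMMAS AND PROOFS =====

-- proof-only normal form for one column's segment counts, seeded with a running count r
def pvSegAux (r : Int) : List String → List Int
  | [] => [r]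
  | c :: cs => if c = "#" then r :: pvSegAux 0 cs
               else pvSegAux (r + if c = "O" then 1 else 0) cs

-- A's inner loop computes pvSegAux
theorem pvStepA_foldl (col : List String) : ∀ (acc : List Int) (r : Int),
    (col.foldl pvStepA (acc, r)).1 ++ [(col.foldl pvStepA (acc, r)).2] = acc ++ pvSegAux r col := by
  induction col with
  | nil => intro acc r; simp [pvSegAux]
  | cons c cs ih =>
    intro acc r
    by_cases hc : c = "#"
    · simp [pvStepA, pvSegAux, hc, ih]
    · by_cases ho : c = "O" <;> simp [pvStepA, pvSegAux, hc, ho, ih]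

theorem pvSegAux_no_wall (col : List String) : ∀ (r : Int), "#" ∉ col →
    pvSegAux r col = [r + (col.count "O" : Int)] := by
  induction col with
  | nil => intro r _; simp [pvSegAux]
  | cons c cs ih =>
    intro r h
    have hc : c ≠ "#" := fun hh => h (by simp [hh])
    have hcs : "#" ∉ cs := fun hh => h (by simp [hh])
    by_cases ho : c = "O"
    · simp [pvSegAux, ho, ih _ hcs]
      ring
    · simp [pvSegAux, hc, ho, ih _ hcs]

theorem pvSegAux_wall (col : List String) : ∀ (r : Int), "#" ∈ col →
    pvSegAux r col =
      (r + ((col.take (col.idxOf "#")).count "O" : Int)) ::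
        pvSegAux 0 (col.drop (col.idxOf "#" + 1)) := by
  induction col with
  | nil => intro r h; simp at h
  | cons c cs ih =>
    intro r h
    by_cases hc : c = "#"
    · subst hc
      simp [pvSegAux, List.idxOf_cons_self]
    · have hcs : "#" ∈ cs := by
        rcases List.mem_cons.mp h with h | h
        · exact absurd h.symm hc
        · exact h
      have hk : (c :: cs).idxOf "#" = cs.idxOf "#" + 1 := List.idxOf_cons_ne cs hc
      by_cases ho : c = "O"
      · simp [pvSegAux, ho, ih _ hcs]
        ring
      · simp [pvSegAux, hc, ho, hk, ih _ hcs]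

-- B's segments-loop computes pvSegAux
theorem pvSegments_eq_segAux (col : List String) : ∀ (counts : List Int),
    pvSegments counts col = counts ++ pvSegAux 0 col := by
  induction hl : col.length using Nat.strong_induction_on generalizing col with
  | _ len ih =>
    intro counts
    by_cases h : "#" ∈ col
    · have hk : col.idxOf "#" < col.length := List.idxOf_lt_length_of_mem h
      rw [pvSegments, dif_pos h, ih ((col.drop (col.idxOf "#" + 1)).length)
            (by subst hl; simp; omega) _ rfl]
      rw [pvSegAux_wall col 0 h]
      simp
    · rw [pvSegments, dif_neg h, pvSegAux_no_wall col 0 h]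
      simp

-- the mutation loop `for j in range(k): rsc[j] = f j` over a preallocated list, normalised
theorem pvFoldl_set (f : Int → List Int) : ∀ (k : Nat) (init : List (List Int)), k ≤ init.length →
    ((List.range k).map (fun (t : Nat) => (t : Int))).foldl (fun acc j => acc.set j.toNat (f j)) init
      = (List.range k).map (fun (t : Nat) => f (t : Int)) ++ init.drop k := by
  intro k
  induction k with
  | zero => intro init _; simp
  | succ k ih =>
    intro init hk
    rw [List.range_succ]
    simp only [List.map_append, List.map_cons, List.map_nil, List.foldl_append, List.foldl_cons,
      List.foldl_nil]
    rw [ih init (by omega)]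
    have hlen : ((List.range k).map (fun (t : Nat) => f (t : Int))).length = k := by simp
    have hdrop : init.drop k = init[k] :: init.drop (k + 1) :=
      List.drop_eq_getElem_cons (by omega)
    rw [hdrop, Int.toNat_natCast, List.set_append_right _ _ (by omega)]
    simp only [hlen, Nat.sub_self, List.set_cons_zero, List.append_assoc, List.cons_append,
      List.nil_append]

theorem count_round_stones_vert_eq (field : List (List String)) (m : Int) (n : Int) :
    count_round_stones_vert field m n = count_round_stones_vert_alt field m n := by
  unfold count_round_stones_vert count_round_stones_vert_alt
  simp only [PySem.List.pyRange_one, zero_add, sub_zero]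
  rw [pvFoldl_set _ (m.toNat) _ (by simp)]
  rw [List.drop_of_length_le (by simp), List.append_nil]
  rw [List.map_map]
  apply List.map_congr_left
  intro t _
  simp only [Function.comp]
  rw [← List.foldl_map (f := fun i => pvCell field i ((t : Nat) : Int)) (g := pvStepA),
    pvStepA_foldl, pvSegments_eq_segAux]

-- ===== VERDICT (by name: the statement is the Claim_ definition above) =====
theorem count_round_stones_vert_spec : Claim_equal_count_round_stones_vert := by
  intro field m n _ _
  unfold Spec_count_round_stones_vert
  exact count_round_stones_vert_eq field m n
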